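-- pv_equiv track=rewrite | github.com/gbildson/5Resources | catan_rl/topology.py | _hex_axial_coords
-- ===== SOURCE A (Python) =====
-- def _hex_axial_coords(radius: int = 2) -> list[tuple[int, int]]:
--     coords: list[tuple[int, int]] = []
--     for r in range(-radius, radius + 1):
--         qmin = max(-radius, -r - radius)
--         qmax = min(radius, -r + radius)
--         for q in range(qmin, qmax + 1):
--             coords.append((q, r))
--     return coords
-- ===== SOURCE B (Python) =====
-- def _hex_axial_coords(radius: int = 2) -> list[tuple[int, int]]:
--     full = range(-radius, radius + 1)
--     return [(q, r) for r in full for q in full if abs(q + r) <= radius]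
-- ===== Notes on version B (the rewrite author's own statement) =====
-- stated objective: simpler
-- what changed: B scans the full (2R+1)x(2R+1) square once and keeps (q,r) iff |q+r| <= radius (the cube-coordinate hex-disk constraint), replacing A's per-row analytic qmin/qmax bound computation with a uniform filter comprehension.
import Mathlib
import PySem

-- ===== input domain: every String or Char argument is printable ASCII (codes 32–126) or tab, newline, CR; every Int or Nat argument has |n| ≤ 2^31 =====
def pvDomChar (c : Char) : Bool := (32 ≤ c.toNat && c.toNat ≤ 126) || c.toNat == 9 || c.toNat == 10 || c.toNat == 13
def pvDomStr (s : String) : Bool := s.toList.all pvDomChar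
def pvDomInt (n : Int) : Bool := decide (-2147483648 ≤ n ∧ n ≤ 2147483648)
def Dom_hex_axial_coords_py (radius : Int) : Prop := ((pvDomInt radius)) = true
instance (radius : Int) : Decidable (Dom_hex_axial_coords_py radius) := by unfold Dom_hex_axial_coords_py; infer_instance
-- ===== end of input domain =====

-- B replaces A's per-row analytic qmin/qmax bounds by one uniform square scan filtered
-- with the hex-disk constraint |q + r| ≤ radius (objective: simpler).

-- ===== PORT A =====
def hex_axial_coords_py (radius : Int) : List (Int × Int) :=
  (PySem.List.pyRange (-radius) (radius + 1) 1).foldl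
    (fun coords r =>
      let qmin := max (-radius) (-r - radius)
      let qmax := min radius (-r + radius)
      (PySem.List.pyRange qmin (qmax + 1) 1).foldl
        (fun coords q => coords ++ [(q, r)]) coords)
    []

-- ===== PORT B =====
def hex_axial_coords_py_alt (radius : Int) : List (Int × Int) :=
  let full := PySem.List.pyRange (-radius) (radius + 1) 1
  full.flatMap (fun r =>
    (full.filter (fun q => decide (|q + r| ≤ radius))).map (fun q => (q, r)))

-- ===== PRECONDITION & SPEC =====
def Spec_hex_axial_coords_py (radius : Int) (out : List (Int × Int)) : Prop := out = hex_axial_coords_py_alt radius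
instance (radius : Int) (out : List (Int × Int)) : Decidable (Spec_hex_axial_coords_py radius out) := by unfold Spec_hex_axial_coords_py; infer_instance

-- ===== CLAIM (what is proved, stated in full; the proofs are below) =====
def Claim_equal_hex_axial_coords_py : Prop := ∀ (radius : Int), Dom_hex_axial_coords_py radius → Spec_hex_axial_coords_py radius (hex_axial_coords_py radius)

-- ===== LEMMAS AND PROOFS =====

-- The filtered full row equals A's analytically bounded row: both are strictly
-- increasing, duplicate-free, and have the same members.
theorem pv_filter_row (radius r : Int) :
    (PySem.List.pyRange (-radius) (radius + 1) 1).filter (fun q => decide (|q + r| ≤ radius))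
      = PySem.List.pyRange (max (-radius) (-r - radius)) (min radius (-r + radius) + 1) 1 := by
  refine List.Perm.eq_of_pairwise (le := (· ≤ ·)) (fun a b _ _ h h' => le_antisymm h h')
    (((PySem.List.pairwise_lt_pyRange_one _ _).sublist (List.filter_sublist (l := _))).imp le_of_lt)
    ((PySem.List.pairwise_lt_pyRange_one _ _).imp le_of_lt) ?_
  rw [List.perm_ext_iff_of_nodup
      ((PySem.List.nodup_pyRange_one _ _).filter _) (PySem.List.nodup_pyRange_one _ _)]
  intro x
  simp only [List.mem_filter, PySem.List.mem_pyRange_one, decide_eq_true_eq, abs_le]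
  omega

-- ===== VERDICT (by name: the statement is the Claim_ definition above) =====
theorem hex_axial_coords_py_spec : Claim_equal_hex_axial_coords_py := by
  intro radius _
  unfold Spec_hex_axial_coords_py hex_axial_coords_py hex_axial_coords_py_alt
  simp only [PySem.List.foldl_append_singleton_eq_map]
  rw [PySem.List.foldl_append_eq_flatMap]
  simp only [List.nil_append]
  exact List.flatMap_congr (fun r _ => by rw [pv_filter_row])
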